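-- pv_equiv track=rewrite | github.com/chitoperalta/rubberize | rubberize/jupyter/magics/tapload.py | _split_percent_fmt
-- ===== SOURCE A (Python) =====
-- def _split_percent_fmt(src: str) -> list[tuple[str, str]]:
--     lines = src.splitlines()
--     chunks: list[tuple[str, list[str]]] = []
--     cur_marker = ""
--     cur_body: list[str] = []
--     saw_percent = False
--
--     for line in lines:
--         # ignore leading blank lines
--         if not cur_body and line.strip() == "":
--             continue
--
--         stripped = line.lower().lstrip()
--         if stripped.startswith("# %%"):
--             # commit previous chunk
--             if cur_body or saw_percent:
--                 chunks.append((cur_marker, cur_body))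
--                 cur_body = []
--
--             # parse marker: remove `# %%` and trim the rest
--             cur_marker = stripped.removeprefix("# %%").strip()
--             saw_percent = True
--         else:
--             cur_body.append(line)
--     chunks.append((cur_marker, cur_body))
--
--     return [(m, "\n".join(b).rstrip()) for m, b in chunks]
-- ===== SOURCE B (Python) =====
-- def _split_percent_fmt(src: str) -> list[tuple[str, str]]:
--     lines = src.splitlines()
--     # Single backward pass: group lines into chunks back-to-front, then format.
--     chunks = []          # (marker, body lines in reverse order), last chunk first
--     seg = []             # current chunk's lines, in reverse order
--     for line in reversed(lines):
--         s = line.lower().lstrip()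
--         if s.startswith("# %%"):
--             chunks.append((s[4:].strip(), seg))
--             seg = []
--         else:
--             seg.append(line)
--     chunks.reverse()
--
--     def trim(rbody):
--         body = rbody[::-1]
--         k = 0
--         while k < len(body) and body[k].strip() == "":
--             k += 1
--         return body[k:]
--
--     lead = trim(seg)
--     out = [("", "\n".join(lead).rstrip())] if (lead or not chunks) else []
--     out.extend((m, "\n".join(trim(b)).rstrip()) for m, b in chunks)
--     return out
-- ===== Notes on version B (the rewrite author's own statement) =====
-- stated objective: alternative
-- what changed: A's forward scan with a cur_marker/cur_body/saw_percent state machine and an inline commit rule is replaced by a backward grouping pass (each '# %%' line closes the chunk accumulated after it) followed by a pure formatting step that trims leading blank lines, joins and rstrips each group and decides whether to emit the leading chunk.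
import Mathlib
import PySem

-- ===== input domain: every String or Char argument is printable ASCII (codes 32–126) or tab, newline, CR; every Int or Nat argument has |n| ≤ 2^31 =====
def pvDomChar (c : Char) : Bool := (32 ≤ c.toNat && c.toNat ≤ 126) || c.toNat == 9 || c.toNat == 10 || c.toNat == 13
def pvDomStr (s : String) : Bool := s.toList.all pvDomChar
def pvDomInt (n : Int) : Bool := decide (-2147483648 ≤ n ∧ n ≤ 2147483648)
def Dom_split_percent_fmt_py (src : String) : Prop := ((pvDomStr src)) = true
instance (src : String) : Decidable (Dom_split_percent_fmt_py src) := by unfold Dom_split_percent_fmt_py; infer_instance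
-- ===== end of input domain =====

-- B replaces A's forward fold (cur_marker/cur_body/saw_percent state machine with an inline commit
-- rule) by a single backward grouping pass plus a pure formatting step (objective: alternative, same cost).

-- ===== PORT A =====
-- helper: str.removeprefix (no PySem primitive) — exact: drop the prefix iff it is a prefix
def pvA_removeprefix (s p : String) : String :=
  if PySem.Str.startswith s p then String.ofList (s.toList.drop p.toList.length) else s

-- the body of A's `for line in lines` loop; state = (chunks, cur_marker, cur_body, saw_percent)
def pvA_step (st : List (String × List String) × String × List String × Bool) (line : String) :
    List (String × List String) × String × List String × Bool :=
  if st.2.2.1.isEmpty && (PySem.Str.strip line == "") then st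
  else
    let stripped := PySem.Str.lstrip (PySem.Str.lower line)
    if PySem.Str.startswith stripped "# %%" then
      let committed :=
        if !st.2.2.1.isEmpty || st.2.2.2 then (st.1 ++ [(st.2.1, st.2.2.1)], ([] : List String))
        else (st.1, st.2.2.1)
      (committed.1, PySem.Str.strip (pvA_removeprefix stripped "# %%"), committed.2, true)
    else (st.1, st.2.1, st.2.2.1 ++ [line], st.2.2.2)

def split_percent_fmt_py (src : String) : List (String × String) :=
  let lines := PySem.Str.splitlines src
  let st := lines.foldl pvA_step ([], "", [], false)
  let chunks := st.1 ++ [(st.2.1, st.2.2.1)]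
  chunks.map (fun mb => (mb.1, PySem.Str.rstrip (PySem.Str.join "\n" mb.2)))

-- ===== PORT B =====
-- the body of B's `for line in reversed(lines)` loop; state = (chunks, seg), both collected back-to-front
def pvB_step (st : List (String × List String) × List String) (line : String) :
    List (String × List String) × List String :=
  let s := PySem.Str.lstrip (PySem.Str.lower line)
  if PySem.Str.startswith s "# %%" then
    (st.1 ++ [(PySem.Str.strip (PySem.Str.slice s (some 4) none), st.2)], [])
  else (st.1, st.2 ++ [line])

-- B's trim: body = rbody[::-1]; the counting loop over leading blank lines + the slice body[k:] IS dropWhile (exact)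
def pvB_trim (rbody : List String) : List String :=
  rbody.reverse.dropWhile (fun l => PySem.Str.strip l == "")

def split_percent_fmt_py_alt (src : String) : List (String × String) :=
  let lines := PySem.Str.splitlines src
  let st := lines.reverse.foldl pvB_step ([], [])
  let chunks := st.1.reverse
  let lead := pvB_trim st.2
  (if !lead.isEmpty || chunks.isEmpty then
     [("", PySem.Str.rstrip (PySem.Str.join "\n" lead))]
   else []) ++
  chunks.map (fun p => (p.1, PySem.Str.rstrip (PySem.Str.join "\n" (pvB_trim p.2))))

-- ===== PRECONDITION & SPEC =====
def Spec_split_percent_fmt_py (src : String) (out : List (String × String)) : Prop := out = split_percent_fmt_py_alt src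
instance (src : String) (out : List (String × String)) : Decidable (Spec_split_percent_fmt_py src out) := by unfold Spec_split_percent_fmt_py; infer_instance

-- ===== CLAIM (what is proved, stated in full; the proofs are below) =====
def Claim_equal_split_percent_fmt_py : Prop := ∀ (src : String), Dom_split_percent_fmt_py src → Spec_split_percent_fmt_py src (split_percent_fmt_py src)

-- ===== LEMMAS AND PROOFS =====

def pvBlank (l : String) : Bool := PySem.Str.strip l == ""
def pvIsM (l : String) : Bool := PySem.Str.startswith (PySem.Str.lstrip (PySem.Str.lower l)) "# %%"
def pvMk (l : String) : String :=
  PySem.Str.strip (PySem.Str.slice (PySem.Str.lstrip (PySem.Str.lower l)) (some 4) none)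

-- common skeleton: (leading segment, [(marker, following segment)…]) of a line list
def pvGrp : List String → List String × List (String × List String)
  | [] => ([], [])
  | l :: t =>
    let r := pvGrp t
    if pvIsM l then ([], (pvMk l, r.1) :: r.2) else (l :: r.1, r.2)

def pvBody (b s : List String) : List String := if b = [] then s.dropWhile pvBlank else b ++ s

theorem pv_lowerChar_space (c : Char) (h : PySem.Chars.isspace c = true) :
    PySem.Chars.lowerChar c = c := by
  simp only [PySem.Chars.isspace] at h
  simp only [PySem.Chars.lowerChar, PySem.Chars.isupper]
  have hv : ('A' ≤ c ∧ c ≤ 'Z') → False := by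
    intro ⟨h1, h2⟩
    rw [Char.le_def, UInt32.le_iff_toNat_le] at h1 h2
    have e : c.val.toNat = c.toNat := rfl
    have ea : ('A').val.toNat = 65 := rfl
    have ez : ('Z').val.toNat = 90 := rfl
    simp at h
    omega
  split_ifs with hif
  · simp at hif; exact absurd ⟨hif.1, hif.2⟩ hv
  · rfl

theorem pv_blank_all_space (l : String) (h : pvBlank l = true) :
    ∀ c ∈ l.toList, PySem.Chars.isspace c = true := by
  have h0 : (PySem.Str.strip l).toList = [] := by
    simp only [pvBlank, beq_iff_eq] at h
    rw [h]; rfl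
  rw [PySem.Str.toList_strip] at h0
  simp only [PySem.Chars.strip, PySem.Chars.rstrip, PySem.Chars.lstrip] at h0
  rw [List.reverse_eq_nil_iff, List.dropWhile_eq_nil_iff] at h0
  intro c hc
  rcases List.mem_append.1 ((List.takeWhile_append_dropWhile (p := PySem.Chars.isspace) (l := l.toList)) ▸ hc) with h1 | h1
  · exact List.mem_takeWhile_imp h1
  · exact h0 c (List.mem_reverse.2 h1)

theorem pv_blank_not_marker (l : String) (h : pvBlank l = true) : pvIsM l = false := by
  have hall := pv_blank_all_space l h
  have hnil : (PySem.Str.lstrip (PySem.Str.lower l)).toList = [] := by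
    rw [PySem.Str.toList_lstrip, PySem.Str.toList_lower]
    simp only [PySem.Chars.lstrip, PySem.Chars.lower]
    rw [List.dropWhile_eq_nil_iff]
    intro x hx
    rcases List.mem_map.1 hx with ⟨c, hc, rfl⟩
    rw [pv_lowerChar_space c (hall c hc)]
    exact hall c hc
  simp only [pvIsM, PySem.Str.startswith, PySem.Chars.startswith, hnil]
  decide

theorem pv_mkA_eq (l : String) (h : pvIsM l = true) :
    PySem.Str.strip (pvA_removeprefix (PySem.Str.lstrip (PySem.Str.lower l)) "# %%") = pvMk l := by
  set s := PySem.Str.lstrip (PySem.Str.lower l) with hs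
  rw [pvA_removeprefix, if_pos (by simpa [pvIsM, hs] using h)]
  unfold pvMk
  rw [← hs]
  have key : (String.ofList (s.toList.drop "# %%".toList.length)).toList
           = (PySem.Str.slice s (some 4) none).toList := by
    rw [String.toList_ofList, PySem.Str.toList_slice, PySem.Chars.slice_eq_listSlice,
        PySem.List.slice_from _ (by norm_num : (0:Int) ≤ 4)]
    have h4 : ("# %%".toList.length) = 4 := by decide
    have h4' : ((4:Int).toNat) = 4 := rfl
    rw [h4, h4']
  simp only [PySem.Str.strip, key]

theorem pv_B_fold (ls : List String) :
    ls.foldr (fun l st => pvB_step st l) ([], []) =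
      (((pvGrp ls).2.map (fun p => (p.1, p.2.reverse))).reverse, (pvGrp ls).1.reverse) := by
  induction ls with
  | nil => rfl
  | cons l t ih =>
    rw [List.foldr_cons, ih]
    by_cases hm : pvIsM l = true
    all_goals
      simp [pvIsM, PySem.Str.startswith] at hm
      simp [pvB_step, pvGrp, pvMk, pvIsM, hm]

theorem pv_A_loop (ls : List String) : ∀ chunks m b saw,
    (let st := ls.foldl pvA_step (chunks, m, b, saw)
     st.1 ++ [(st.2.1, st.2.2.1)]) =
    chunks ++
      (if (pvGrp ls).2 ≠ [] ∧ pvBody b (pvGrp ls).1 = [] ∧ saw = false then []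
       else [(m, pvBody b (pvGrp ls).1)]) ++
      (pvGrp ls).2.map (fun p => (p.1, p.2.dropWhile pvBlank)) := by
  induction ls with
  | nil =>
    intro chunks m b saw
    by_cases hb : b = [] <;> simp [pvGrp, pvBody, hb]
  | cons l t ih =>
    intro chunks m b saw
    simp only [List.foldl_cons]
    by_cases hm : pvIsM l = true
    · -- marker line
      have hbl : (PySem.Str.strip l == "") = false := by
        cases hbl0 : pvBlank l with
        | true => rw [pv_blank_not_marker l hbl0] at hm; exact absurd hm (by simp)
        | false => simpa [pvBlank] using hbl0
      have hm' : PySem.Chars.startswith (PySem.Chars.lstrip (PySem.Chars.lower l.toList)) ['#', ' ', '%', '%'] = true := by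
        simpa [pvIsM, PySem.Str.startswith] using hm
      have hstep : pvA_step (chunks, m, b, saw) l =
          ((if !b.isEmpty || saw then (chunks ++ [(m, b)], ([] : List String)) else (chunks, b)).1,
           PySem.Str.strip (pvA_removeprefix (PySem.Str.lstrip (PySem.Str.lower l)) "# %%"),
           (if !b.isEmpty || saw then (chunks ++ [(m, b)], ([] : List String)) else (chunks, b)).2,
           true) := by
        simp [pvA_step, hbl, hm']
      rw [hstep, pv_mkA_eq l hm]
      by_cases hc : b = [] ∧ saw = false
      · have hcb : (!b.isEmpty || saw) = false := by simp [hc.1, hc.2]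
        rw [hcb, if_neg (by simp)]
        have hih := ih chunks (pvMk l) b true
        rw [hc.1] at *
        rw [hih]
        simp [pvGrp, pvBody, hm, hc.2]
      · have hcb : (!b.isEmpty || saw) = true := by
          rcases not_and_or.1 hc with h | h
          · simp [h]
          · simp at h; simp [h]
        rw [hcb, if_pos rfl]
        rw [ih (chunks ++ [(m, b)]) (pvMk l) [] true]
        have hnc : ¬ ((pvGrp (l :: t)).2 ≠ [] ∧ pvBody b (pvGrp (l :: t)).1 = [] ∧ saw = false) := by
          simp only [pvGrp, hm, if_pos]
          rcases not_and_or.1 hc with h | h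
          · intro hcon; exact h (by simpa [pvBody] using hcon.2.1)
          · simp at h; simp [h]
        rw [if_neg hnc]
        simp [pvGrp, pvBody, hm]
    · -- not a marker line
      have hm0 : pvIsM l = false := by simpa using hm
      by_cases hskip : b = [] ∧ pvBlank l = true
      · -- leading blank line: skipped
        have hstep : pvA_step (chunks, m, b, saw) l = (chunks, m, b, saw) := by
          simp only [pvA_step]
          rw [if_pos (by simp [hskip.1, show (PySem.Str.strip l == "") = true from hskip.2])]
        rw [hstep, ih chunks m b saw]
        have hgrp : pvGrp (l :: t) = (l :: (pvGrp t).1, (pvGrp t).2) := by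
          simp [pvGrp, hm0]
        have hbody : pvBody b (pvGrp (l :: t)).1 = pvBody b (pvGrp t).1 := by
          rw [hgrp, hskip.1]
          simp only [pvBody]
          exact List.dropWhile_cons_of_pos hskip.2
        rw [hgrp] at hbody ⊢
        rw [hbody]
      · -- ordinary body line: appended
        have hstep : pvA_step (chunks, m, b, saw) l = (chunks, m, b ++ [l], saw) := by
          simp only [pvA_step]
          rw [if_neg (by
            rcases not_and_or.1 hskip with h | h
            · simp [h]
            · simp [pvBlank] at h; simp [h])]
          rw [if_neg (by simpa [pvIsM, PySem.Str.startswith] using hm0 : ¬ _)]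
        rw [hstep, ih chunks m (b ++ [l]) saw]
        have hgrp : pvGrp (l :: t) = (l :: (pvGrp t).1, (pvGrp t).2) := by
          simp [pvGrp, hm0]
        rw [hgrp]
        have hbody : pvBody (b ++ [l]) (pvGrp t).1 = pvBody b (l :: (pvGrp t).1) := by
          by_cases hb : b = []
          · subst hb
            have hbl0 : pvBlank l = false := by
              cases hbl1 : pvBlank l with
              | true => exact absurd ⟨rfl, hbl1⟩ hskip
              | false => rfl
            simp [pvBody, hbl0]
          · simp [pvBody, hb, List.append_assoc]
        rw [hbody]

theorem pv_main (src : String) : split_percent_fmt_py src = split_percent_fmt_py_alt src := by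
  unfold split_percent_fmt_py split_percent_fmt_py_alt
  simp only []
  set lines := PySem.Str.splitlines src with hlines
  rw [pv_A_loop lines [] "" [] false]
  rw [List.foldl_reverse]
  rw [pv_B_fold lines]
  have hpred : (fun l => PySem.Str.strip l == "") = pvBlank := by
    funext l; rfl
  simp only [pvB_trim, hpred, List.reverse_reverse]
  set s := (pvGrp lines).1
  set cs := (pvGrp lines).2
  simp only [List.nil_append, List.map_append, List.map_map]
  have hbody0 : pvBody [] s = s.dropWhile pvBlank := by simp [pvBody]
  rw [hbody0]
  by_cases hc : cs = []
  · rw [if_neg (by simp [hc]), hc]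
    simp
  · by_cases hs : s.dropWhile pvBlank = []
    · rw [if_pos ⟨hc, hs, trivial⟩]
      rw [hs]
      have : (cs.map (fun p => (p.1, p.2.reverse))).isEmpty = false := by
        simp [hc]
      simp [this, Function.comp]
    · rw [if_neg (by simp [hs])]
      simp [hs, Function.comp]

-- ===== VERDICT (by name: the statement is the Claim_ definition above) =====
theorem split_percent_fmt_py_spec : Claim_equal_split_percent_fmt_py := by
  intro src _
  unfold Spec_split_percent_fmt_py
  exact pv_main src
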